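-- pv_equiv track=rewrite | github.com/Kiran-Jones/ccd-nbd | backend/app/utils/formatting.py | merge_formatting_spans
-- ===== SOURCE A (Python) =====
-- from typing import List
--
-- def merge_formatting_spans(bold: List[bool], italic: List[bool], text: str) -> str:
--     """
--     Convert character-level formatting to HTML-like spans.
--     Returns formatted string with <b> and <i> tags.
--     """
--     if not text:
--         return ""
--
--     result = []
--     in_bold = False
--     in_italic = False
--
--     for i, char in enumerate(text):
--         is_bold = bold[i] if i < len(bold) else False
--         is_italic = italic[i] if i < len(italic) else False
--
--         # Handle bold transitions
--         if is_bold and not in_bold: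
--             result.append("<b>")
--             in_bold = True
--         elif not is_bold and in_bold:
--             result.append("</b>")
--             in_bold = False
--
--         # Handle italic transitions
--         if is_italic and not in_italic:
--             result.append("<i>")
--             in_italic = True
--         elif not is_italic and in_italic:
--             result.append("</i>")
--             in_italic = False
--
--         result.append(char)
--
--     # Close any remaining tags
--     if in_italic:
--         result.append("</i>")
--     if in_bold:
--         result.append("</b>")
--
--     return "".join(result)
-- ===== SOURCE B (Python) =====
-- from itertools import groupby
-- from typing import List
--
-- def merge_formatting_spans(bold: List[bool], italic: List[bool], text: str) -> str:
--     """Run-based rewrite: group characters into maximal runs of constant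
--     (bold, italic) state with itertools.groupby and emit tags per run."""
--     if not text:
--         return ""
--
--     pairs = [((bold[i] if i < len(bold) else False,
--                italic[i] if i < len(italic) else False), ch)
--              for i, ch in enumerate(text)]
--
--     out = []
--     prev = (False, False)
--     for state, grp in groupby(pairs, key=lambda p: p[0]):
--         b, it = state
--         if b != prev[0]:
--             out.append("<b>" if b else "</b>")
--         if it != prev[1]:
--             out.append("<i>" if it else "</i>")
--         out.extend(ch for _, ch in grp)
--         prev = state
--
--     if prev[1]:
--         out.append("</i>")
--     if prev[0]:
--         out.append("</b>")
--     return "".join(out)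
-- ===== Notes on version B (the rewrite author's own statement) =====
-- stated objective: alternative
-- what changed: Replaced A's per-character state-transition loop by building the list of (state, char) pairs once and iterating with itertools.groupby over maximal runs of constant (bold, italic) state, emitting boundary tags per run and the run's characters in bulk.
import Mathlib
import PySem

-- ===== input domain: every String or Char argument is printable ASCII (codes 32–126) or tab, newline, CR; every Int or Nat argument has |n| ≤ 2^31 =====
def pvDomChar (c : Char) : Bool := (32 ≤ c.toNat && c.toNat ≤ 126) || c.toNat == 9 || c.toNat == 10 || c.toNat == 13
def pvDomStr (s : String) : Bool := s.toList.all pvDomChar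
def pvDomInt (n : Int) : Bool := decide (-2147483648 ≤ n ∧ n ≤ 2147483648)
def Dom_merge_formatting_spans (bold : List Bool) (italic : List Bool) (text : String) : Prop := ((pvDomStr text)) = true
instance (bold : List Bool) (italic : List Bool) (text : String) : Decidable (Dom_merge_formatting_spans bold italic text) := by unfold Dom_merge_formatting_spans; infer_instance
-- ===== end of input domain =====

-- B replaces A's per-character transition loop by an itertools.groupby-style pass over
-- maximal runs of constant (bold, italic) state; objective: alternative decomposition (no speed claim).

-- ===== PORT A =====
-- per-character loop body of A (bold transition, italic transition, then the char)
def pvStepA (bold : List Bool) (italic : List Bool)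
    (st : List String × Bool × Bool) (p : Int × Char) : List String × Bool × Bool :=
  let result := st.1
  let in_bold := st.2.1
  let in_italic := st.2.2
  let is_bold := if p.1 < (bold.length : Int) then PySem.List.pyGetD bold p.1 false else false
  let is_italic := if p.1 < (italic.length : Int) then PySem.List.pyGetD italic p.1 false else false
  let rb : List String × Bool :=
    if is_bold && !in_bold then (result ++ ["<b>"], true)
    else if !is_bold && in_bold then (result ++ ["</b>"], false)
    else (result, in_bold)
  let ri : List String × Bool :=
    if is_italic && !in_italic then (rb.1 ++ ["<i>"], true)
    else if !is_italic && in_italic then (rb.1 ++ ["</i>"], false)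
    else (rb.1, in_italic)
  (ri.1 ++ [String.singleton p.2], rb.2, ri.2)

def merge_formatting_spans (bold : List Bool) (italic : List Bool) (text : String) : String :=
  if text = "" then ""
  else
    let r := (PySem.List.enumerate text.toList).foldl (pvStepA bold italic) ([], false, false)
    let result := if r.2.2 then r.1 ++ ["</i>"] else r.1
    let result := if r.2.1 then result ++ ["</b>"] else result
    String.join result

-- ===== PORT B =====
-- effective (bold, italic) state at index i  (B's pair-building comprehension)
def pvState (bold : List Bool) (italic : List Bool) (i : Int) : Bool × Bool :=
  ((if i < (bold.length : Int) then PySem.List.pyGetD bold i false else false),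
   (if i < (italic.length : Int) then PySem.List.pyGetD italic i false else false))

def pvPairs (bold : List Bool) (italic : List Bool) (text : String) : List ((Bool × Bool) × Char) :=
  (PySem.List.enumerate text.toList).map (fun p => (pvState bold italic p.1, p.2))

-- itertools.groupby over the state key: maximal runs of constant state
def pvRuns : List ((Bool × Bool) × Char) → List ((Bool × Bool) × List Char)
  | [] => []
  | (s, c) :: rest =>
      (s, c :: (rest.takeWhile (fun p => p.1 == s)).map Prod.snd)
        :: pvRuns (rest.dropWhile (fun p => p.1 == s))
termination_by l => l.length
decreasing_by
  have := List.length_dropWhile_le (fun p => p.1 == s) rest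
  simp only [List.length_cons]
  omega

-- B's per-run loop body: close/open tags at the run boundary, then the run's chars
def pvStepB (st : List String × (Bool × Bool)) (r : (Bool × Bool) × List Char) :
    List String × (Bool × Bool) :=
  let out := st.1
  let prev := st.2
  let s := r.1
  let out := if s.1 != prev.1 then out ++ [if s.1 then "<b>" else "</b>"] else out
  let out := if s.2 != prev.2 then out ++ [if s.2 then "<i>" else "</i>"] else out
  (out ++ r.2.map (fun ch => String.singleton ch), s)

def merge_formatting_spans_alt (bold : List Bool) (italic : List Bool) (text : String) : String :=
  if text = "" then ""
  else
    let r := (pvRuns (pvPairs bold italic text)).foldl pvStepB ([], (false, false))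
    let out := if r.2.2 then r.1 ++ ["</i>"] else r.1
    let out := if r.2.1 then out ++ ["</b>"] else out
    String.join out

-- ===== PRECONDITION & SPEC =====
def Spec_merge_formatting_spans (bold : List Bool) (italic : List Bool) (text : String) (out : String) : Prop := out = merge_formatting_spans_alt bold italic text
instance (bold : List Bool) (italic : List Bool) (text : String) (out : String) : Decidable (Spec_merge_formatting_spans bold italic text out) := by unfold Spec_merge_formatting_spans; infer_instance

-- ===== CLAIM (what is proved, stated in full; the proofs are below) =====
def Claim_equal_merge_formatting_spans : Prop := ∀ (bold : List Bool) (italic : List Bool) (text : String), Dom_merge_formatting_spans bold italic text → Spec_merge_formatting_spans bold italic text (merge_formatting_spans bold italic text)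

-- ===== LEMMAS AND PROOFS =====

-- the tags emitted at a state transition prev → s (bold first, then italic)
def pvTags (prev s : Bool × Bool) : List String :=
  (if s.1 ≠ prev.1 then [if s.1 = true then "<b>" else "</b>"] else []) ++
  (if s.2 ≠ prev.2 then [if s.2 = true then "<i>" else "</i>"] else [])

-- canonical per-(state,char) step, common form of both loop bodies
def pvCk (st : List String × (Bool × Bool)) (p : (Bool × Bool) × Char) :
    List String × (Bool × Bool) :=
  (st.1 ++ pvTags st.2 p.1 ++ [String.singleton p.2], p.1)

theorem pvTags_self (s : Bool × Bool) : pvTags s s = [] := by simp [pvTags]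

theorem pvStepA_eq (bold italic : List Bool) (st : List String × Bool × Bool) (p : Int × Char) :
    pvStepA bold italic st p = pvCk st (pvState bold italic p.1, p.2) := by
  obtain ⟨acc, pb, pi⟩ := st
  obtain ⟨i, c⟩ := p
  simp only [pvStepA, pvCk, pvState, pvTags]
  cases hb : (if i < (bold.length : Int) then PySem.List.pyGetD bold i false else false) <;>
  cases hi : (if i < (italic.length : Int) then PySem.List.pyGetD italic i false else false) <;>
  cases pb <;> cases pi <;> simp

theorem pvStepB_eq (st : List String × (Bool × Bool)) (r : (Bool × Bool) × List Char) :
    pvStepB st r = (st.1 ++ pvTags st.2 r.1 ++ r.2.map (fun ch => String.singleton ch), r.1) := by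
  obtain ⟨acc, pb, pi⟩ := st
  obtain ⟨⟨b, it⟩, cs⟩ := r
  cases b <;> cases it <;> cases pb <;> cases pi <;> simp [pvStepB, pvTags]

-- within a run of constant state, pvCk only appends the characters
theorem pvCk_const_run (l : List ((Bool × Bool) × Char)) :
    ∀ (acc : List String) (s : Bool × Bool), (∀ p ∈ l, p.1 = s) →
      l.foldl pvCk (acc, s) = (acc ++ l.map (fun p => String.singleton p.2), s) := by
  induction l with
  | nil => intro acc s _; simp
  | cons p t ih =>
      intro acc s h
      have hp : p.1 = s := h p (by simp)
      simp only [List.foldl_cons, List.map_cons]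
      rw [show pvCk (acc, s) p = (acc ++ [String.singleton p.2], s) by
            simp [pvCk, hp, pvTags_self]]
      rw [ih (acc ++ [String.singleton p.2]) s (fun q hq => h q (by simp [hq]))]
      simp

theorem pvFold_runs (l : List ((Bool × Bool) × Char)) :
    ∀ (acc : List String) (st : Bool × Bool),
      l.foldl pvCk (acc, st) = (pvRuns l).foldl pvStepB (acc, st) := by
  induction l using pvRuns.induct with
  | case1 => intro acc st; simp [pvRuns]
  | case2 s c rest ih =>
      intro acc st
      rw [pvRuns]
      set q : ((Bool × Bool) × Char) → Bool := fun p => p.1 == s with hq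
      have hsplit : rest = rest.takeWhile q ++ rest.dropWhile q :=
        (List.takeWhile_append_dropWhile).symm
      have hck : pvCk (acc, st) (s, c) = (acc ++ pvTags st s ++ [String.singleton c], s) := rfl
      have hconst : ∀ p ∈ rest.takeWhile q, p.1 = s := by
        intro p hp
        have := List.mem_takeWhile_imp hp
        simpa [hq] using this
      calc ((s, c) :: rest).foldl pvCk (acc, st)
          = (rest.takeWhile q ++ rest.dropWhile q).foldl pvCk
              (acc ++ pvTags st s ++ [String.singleton c], s) := by
            rw [List.foldl_cons, hck, ← hsplit]
        _ = (rest.dropWhile q).foldl pvCk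
              ((acc ++ pvTags st s ++ [String.singleton c]) ++
                (rest.takeWhile q).map (fun p => String.singleton p.2), s) := by
            rw [List.foldl_append,
                pvCk_const_run (rest.takeWhile q) _ s hconst]
        _ = (pvRuns (rest.dropWhile q)).foldl pvStepB
              ((acc ++ pvTags st s ++ [String.singleton c]) ++
                (rest.takeWhile q).map (fun p => String.singleton p.2), s) := ih _ _
        _ = ((s, c :: (rest.takeWhile q).map Prod.snd) :: pvRuns (rest.dropWhile q)).foldl
              pvStepB (acc, st) := by
            rw [List.foldl_cons, pvStepB_eq]
            simp [List.map_map, Function.comp_def]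

theorem pvFoldA_eq (bold italic : List Bool) (text : String) :
    (PySem.List.enumerate text.toList).foldl (pvStepA bold italic) ([], false, false)
      = (pvRuns (pvPairs bold italic text)).foldl pvStepB ([], (false, false)) := by
  have h1 : (PySem.List.enumerate text.toList).foldl (pvStepA bold italic) ([], false, false)
      = (pvPairs bold italic text).foldl pvCk ([], (false, false)) := by
    have hf : (fun (x : List String × (Bool × Bool)) (p : Int × Char) =>
        pvCk x (pvState bold italic p.1, p.2)) = pvStepA bold italic := by
      funext x p; exact (pvStepA_eq bold italic x p).symm
    rw [pvPairs, List.foldl_map, hf]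
  rw [h1, pvFold_runs]

-- ===== VERDICT (by name: the statement is the Claim_ definition above) =====
theorem merge_formatting_spans_spec : Claim_equal_merge_formatting_spans := by
  intro bold italic text _
  unfold Spec_merge_formatting_spans merge_formatting_spans merge_formatting_spans_alt
  by_cases h : text = ""
  · simp [h]
  · simp only [h, if_false]
    rw [pvFoldA_eq]
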